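-- pv_equiv track=rewrite | github.com/Ukasz11233/Algorithms | Algorytmy/Zadania z sortowań liniowych/zadanie_10.py | BiggestGCD
-- ===== SOURCE A (Python) =====
-- def BiggestGCD(A, n):
--     buckets = [[] for _ in range(n)]
--     for i in range(n):
--         tmp = A[i]
--         norm = 2
--         while norm <= tmp:
--             if tmp % norm == 0:
--                 buckets[norm].append(tmp)
--             norm += 1
--     max_length = 0
--     for i in range(n):
--         length = len(buckets[i])
--         if length > max_length:
--             max_length = length
--     return max_length
-- ===== SOURCE B (Python) =====
-- def BiggestGCD(A, n):
--     # Sieve: count frequencies of the first n values (>= 2), then for each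
--     # candidate divisor d sum the frequencies over its multiples.
--     freq = {}
--     m = 1
--     for i in range(n):
--         a = A[i]
--         if a >= 2:
--             freq[a] = freq.get(a, 0) + 1
--             if a > m:
--                 m = a
--     best = 0
--     for d in range(2, m + 1):
--         total = 0
--         for mult in range(d, m + 1, d):
--             total += freq.get(mult, 0)
--         if total > best:
--             best = total
--     return best
-- ===== Notes on version B (the rewrite author's own statement) =====
-- stated objective: faster
-- what changed: A enumerates, for each element, every candidate divisor from 2 up to the element and appends to per-divisor buckets (O(sum of values) work); B builds a frequency dictionary of the first n values in one pass and then, sieve-style, sums frequencies over the multiples of each candidate divisor up to the maximum value (O(n + M log M)).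
import Mathlib
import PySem

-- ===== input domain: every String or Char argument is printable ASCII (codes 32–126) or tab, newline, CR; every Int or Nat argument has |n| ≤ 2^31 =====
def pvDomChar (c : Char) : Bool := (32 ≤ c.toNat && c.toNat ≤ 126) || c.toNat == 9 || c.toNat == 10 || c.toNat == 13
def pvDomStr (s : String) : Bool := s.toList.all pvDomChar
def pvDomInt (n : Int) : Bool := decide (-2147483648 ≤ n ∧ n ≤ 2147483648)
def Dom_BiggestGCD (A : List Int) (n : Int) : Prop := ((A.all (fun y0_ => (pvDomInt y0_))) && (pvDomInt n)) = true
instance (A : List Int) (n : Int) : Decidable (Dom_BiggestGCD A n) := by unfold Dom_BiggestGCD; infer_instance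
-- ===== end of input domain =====

-- B replaces A's per-element divisor enumeration (O(sum of values)) by a frequency
-- dictionary plus a sieve-style sum of frequencies over the multiples of each divisor.

-- ===== PORT A =====
-- the inner 'while norm <= tmp' loop of A; norm starts at 2 and only grows,
-- so norm.toNat is exact (never a negative index)
def BiggestGCD_while (buckets : List (List Int)) (tmp norm : Int) : List (List Int) :=
  if h : norm ≤ tmp then
    BiggestGCD_while
      (if PySem.Int.mod tmp norm = 0 then buckets.modify norm.toNat (fun b => b ++ [tmp]) else buckets)
      tmp (norm + 1)
  else buckets
  termination_by (tmp + 1 - norm).toNat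
  decreasing_by omega

def BiggestGCD (A : List Int) (n : Int) : Int :=
  let buckets0 := (PySem.List.pyRange 0 n 1).map (fun _ => ([] : List Int))
  let buckets := (PySem.List.pyRange 0 n 1).foldl
      (fun bs i => BiggestGCD_while bs (PySem.List.pyGetD A i 0) 2) buckets0
  (PySem.List.pyRange 0 n 1).foldl
    (fun max_length i =>
      let length := PySem.List.len (PySem.List.pyGetD buckets i ([] : List Int))
      if max_length < length then length else max_length) 0

-- ===== PORT B =====
def BiggestGCD_alt (A : List Int) (n : Int) : Int :=
  let fm := (PySem.List.pyRange 0 n 1).foldl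
      (fun (fm : PySem.Dict Int Int × Int) i =>
        let a := PySem.List.pyGetD A i 0
        if 2 ≤ a then
          (fm.1.insert a (fm.1.getD a 0 + 1), if fm.2 < a then a else fm.2)
        else fm)
      (PySem.Dict.empty, 1)
  (PySem.List.pyRange 2 (fm.2 + 1) 1).foldl
    (fun best d =>
      let total := (PySem.List.pyRange d (fm.2 + 1) d).foldl
          (fun t mult => t + fm.1.getD mult 0) 0
      if best < total then total else best) 0

-- ===== PRECONDITION & SPEC =====
-- Pre_ excludes exactly the inputs on which A raises IndexError: n > len(A)
-- (A[i] out of range) or some of the first n elements a with a >= 2 and a >= n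
-- (buckets[a] out of range).
def Pre_BiggestGCD (A : List Int) (n : Int) : Prop :=
  n ≤ (A.length : Int) ∧ ∀ a ∈ A.take n.toNat, a ≤ 1 ∨ a < n
instance (A : List Int) (n : Int) : Decidable (Pre_BiggestGCD A n) := by
  unfold Pre_BiggestGCD; infer_instance

def pvWitness_BiggestGCD : List Int × Int := ([4, 6, 8, 9, 0, 1, -3, 7, 2, 0], 10)

def Spec_BiggestGCD (A : List Int) (n : Int) (out : Int) : Prop := out = BiggestGCD_alt A n
instance (A : List Int) (n : Int) (out : Int) : Decidable (Spec_BiggestGCD A n out) := by unfold Spec_BiggestGCD; infer_instance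

-- ===== CLAIM (what is proved, stated in full; the proofs are below) =====
def Claim_equal_BiggestGCD : Prop := ∀ (A : List Int) (n : Int), Dom_BiggestGCD A n → Pre_BiggestGCD A n → Spec_BiggestGCD A n (BiggestGCD A n)

-- ===== LEMMAS AND PROOFS =====

-- the predicate "A appends a to bucket d": 2 ≤ d ≤ a and d divides a
def pvPredA (d : Int) : Int → Bool := fun a => decide (2 ≤ d ∧ d ≤ a ∧ PySem.Int.mod a d = 0)
def pvCnt (xs : List Int) (d : Int) : Int := (xs.countP (pvPredA d) : Int)
def pvVals (xs : List Int) : List Int := xs.filter (fun a => decide (2 ≤ a))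
def pvMv (xs : List Int) : Int := (pvVals xs).foldl max 1

lemma while_length (tmp norm : Int) (bs : List (List Int)) :
    (BiggestGCD_while bs tmp norm).length = bs.length := by
  rw [BiggestGCD_while.eq_def]
  split_ifs with h h2
  · rw [while_length]; simp
  · rw [while_length]
  · rfl
  termination_by (tmp + 1 - norm).toNat
  decreasing_by all_goals omega

lemma getD_modify_self' (bs : List (List Int)) (i : Nat) (f : List Int → List Int)
    (h : i < bs.length) : (bs.modify i f).getD i [] = f (bs.getD i []) := by
  simp [List.getD_eq_getElem?_getD, List.getElem?_modify, List.getElem?_eq_getElem h]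

lemma getD_modify_out (bs : List (List Int)) (i : Nat) (f : List Int → List Int)
    (h : ¬ i < bs.length) : (bs.modify i f).getD i [] = bs.getD i [] := by
  simp [List.getD_eq_getElem?_getD,
        List.getElem?_eq_none (by omega : bs.length ≤ i)]

lemma getD_modify_ne (bs : List (List Int)) (i j : Nat) (f : List Int → List Int)
    (h : i ≠ j) : (bs.modify i f).getD j [] = bs.getD j [] := by
  simp [List.getD_eq_getElem?_getD, h]

lemma while_getD (tmp norm : Int) (h0 : 0 < norm) (bs : List (List Int)) (dN : Nat) :
    (BiggestGCD_while bs tmp norm).getD dN [] =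
      bs.getD dN [] ++
        (if norm ≤ (dN : Int) ∧ (dN : Int) ≤ tmp ∧ PySem.Int.mod tmp (dN : Int) = 0 ∧ dN < bs.length
         then [tmp] else []) := by
  by_cases h : norm ≤ tmp
  · rw [BiggestGCD_while.eq_def, dif_pos h]
    by_cases hm : PySem.Int.mod tmp norm = 0
    · rw [if_pos hm, while_getD tmp (norm + 1) (by omega) _ dN]
      by_cases hdn : (dN : Int) = norm
      · have hnn : norm.toNat = dN := by omega
        rw [if_neg (by rintro ⟨h1, -⟩; omega), List.append_nil]
        by_cases hlen : dN < bs.length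
        · rw [hnn, getD_modify_self' bs dN _ hlen,
              if_pos ⟨by omega, by omega, by rwa [hdn], hlen⟩]
        · rw [hnn, getD_modify_out bs dN _ hlen,
              if_neg (by rintro ⟨-, -, -, hc⟩; exact hlen hc), List.append_nil]
      · rw [getD_modify_ne bs norm.toNat dN _ (by omega)]
        congr 1
        rw [List.length_modify]
        apply if_congr _ rfl rfl
        constructor
        · rintro ⟨h1, h2, h3, h4⟩; exact ⟨by omega, h2, h3, h4⟩
        · rintro ⟨h1, h2, h3, h4⟩; exact ⟨by omega, h2, h3, h4⟩
    · rw [if_neg hm, while_getD tmp (norm + 1) (by omega) _ dN]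
      congr 1
      apply if_congr _ rfl rfl
      constructor
      · rintro ⟨h1, h2, h3, h4⟩; exact ⟨by omega, h2, h3, h4⟩
      · rintro ⟨h1, h2, h3, h4⟩
        have hne : (dN : Int) ≠ norm := by
          intro heq; exact hm (heq ▸ h3)
        exact ⟨by omega, h2, h3, h4⟩
  · rw [BiggestGCD_while.eq_def, dif_neg h,
        if_neg (by rintro ⟨h1, h2, -, -⟩; omega : ¬ (norm ≤ (dN : Int) ∧ (dN : Int) ≤ tmp ∧
          PySem.Int.mod tmp (dN : Int) = 0 ∧ dN < bs.length)), List.append_nil]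
  termination_by (tmp + 1 - norm).toNat
  decreasing_by all_goals omega

lemma foldA_length (vs : List Int) (bs : List (List Int)) :
    (vs.foldl (fun b a => BiggestGCD_while b a 2) bs).length = bs.length := by
  induction vs generalizing bs with
  | nil => rfl
  | cons a vs ih => rw [List.foldl_cons, ih, while_length]

lemma getD_nil_map {α : Type} (L : List α) (k : Nat) :
    (L.map (fun _ => ([] : List Int))).getD k [] = [] := by
  rw [List.getD_eq_getElem?_getD, List.getElem?_map]
  cases L[k]? <;> rfl

lemma foldA_getD (vs : List Int) (bs : List (List Int)) (dN : Nat) (hd : dN < bs.length) :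
    (vs.foldl (fun b a => BiggestGCD_while b a 2) bs).getD dN [] =
      bs.getD dN [] ++ vs.filter (fun a => pvPredA (dN : Int) a) := by
  induction vs generalizing bs with
  | nil => simp
  | cons a vs ih =>
    rw [List.foldl_cons, List.filter_cons,
        ih _ (by rw [while_length]; exact hd),
        while_getD a 2 (by norm_num) bs dN]
    by_cases hp : 2 ≤ (dN : Int) ∧ (dN : Int) ≤ a ∧ PySem.Int.mod a (dN : Int) = 0
    · rw [if_pos ⟨hp.1, hp.2.1, hp.2.2, hd⟩, List.append_assoc]
      have : pvPredA (dN : Int) a = true := by unfold pvPredA; exact decide_eq_true hp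
      rw [if_pos this]
      rfl
    · rw [if_neg (by rintro ⟨h1, h2, h3, -⟩; exact hp ⟨h1, h2, h3⟩), List.append_nil]
      have : ¬ pvPredA (dN : Int) a = true := by
        unfold pvPredA; simpa using hp
      rw [if_neg this]

lemma fold_range_take {β : Type} (A : List Int) (n : Int) (h : n ≤ (A.length : Int))
    (f : β → Int → β) (init : β) :
    (PySem.List.pyRange 0 n 1).foldl (fun acc i => f acc (PySem.List.pyGetD A i 0)) init =
      (A.take n.toNat).foldl f init := by
  rcases le_or_gt n 0 with hn | hn
  · rw [PySem.List.pyRange_one_eq_nil hn, show n.toNat = 0 by omega]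
    simp
  · have hlen : ((A.take n.toNat).length : Int) = n := by
      simp only [List.length_take]
      omega
    obtain ⟨xs, hxs⟩ : ∃ xs, A.take n.toNat = xs := ⟨_, rfl⟩
    rw [hxs] at hlen ⊢
    rw [PySem.List.foldl_congr_mem _ _
        (fun acc i => f acc (PySem.List.pyGetD xs i 0)) init ?_]
    · rw [← hlen]
      exact PySem.List.foldl_pyRange_zero_pyGetD' xs 0 f init
    · intro acc x hx
      rw [PySem.List.mem_pyRange_one] at hx
      dsimp only
      rw [PySem.List.pyGetD_eq_getElem A 0 hx.1 (by omega),
          PySem.List.pyGetD_eq_getElem xs 0 hx.1 (by omega)]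
      congr 1
      subst hxs
      exact (List.getElem_take).symm

lemma foldB_pair (vs : List Int) (d0 : PySem.Dict Int Int) (m0 : Int) :
    vs.foldl
        (fun (fm : PySem.Dict Int Int × Int) a =>
          if 2 ≤ a then (fm.1.insert a (fm.1.getD a 0 + 1), if fm.2 < a then a else fm.2) else fm)
        (d0, m0) =
      ((vs.filter (fun a => decide (2 ≤ a))).foldl (fun d a => d.insert a (d.getD a 0 + 1)) d0,
       (vs.filter (fun a => decide (2 ≤ a))).foldl (fun m a => if m < a then a else m) m0) := by
  induction vs generalizing d0 m0 with
  | nil => simp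
  | cons a vs ih => by_cases h : 2 ≤ a <;> simp [h, ih]

lemma counter_getD (vs : List Int) (k : Int) :
    (vs.foldl (fun (d : PySem.Dict Int Int) a => d.insert a (d.getD a 0 + 1)) PySem.Dict.empty).getD k 0
      = (vs.count k : Int) := by
  have hfun : (fun (d : PySem.Dict Int Int) a => d.insert a (d.getD a 0 + 1))
      = (fun (d : PySem.Dict Int Int) x => d.modify x 0 (fun v => v + 1)) := rfl
  rw [hfun, PySem.Dict.getD_foldl_modify_add_one,
      show (PySem.Dict.empty : PySem.Dict Int Int).getD k 0 = 0 from rfl, zero_add]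

lemma runmax_eq_foldl_max (vs : List Int) (m0 : Int) :
    vs.foldl (fun m a => if m < a then a else m) m0 = vs.foldl max m0 := by
  apply PySem.List.foldl_congr_mem
  intro acc x _
  rcases le_or_gt x acc with h | h
  · rw [if_neg (not_lt.mpr h), max_eq_left h]
  · rw [if_pos h, max_eq_right h.le]

lemma count_add_countP (m : Int) (L : List Int) (hm : m ∉ L) (vs : List Int) :
    vs.count m + vs.countP (fun a => decide (a ∈ L)) = vs.countP (fun a => decide (a ∈ m :: L)) := by
  induction vs with
  | nil => simp
  | cons b vs ih =>
    simp only [List.mem_cons] at ih ⊢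
    rw [List.count_cons, List.countP_cons, List.countP_cons, ← ih]
    by_cases h1 : b = m <;> by_cases h2 : b ∈ L
    · exact absurd (h1 ▸ h2) hm
    all_goals simp [h1, h2, hm]
    all_goals omega

lemma sum_count (L : List Int) (hL : L.Nodup) (vs : List Int) :
    (L.map (fun m => (vs.count m : Int))).sum = (vs.countP (fun a => decide (a ∈ L)) : Int) := by
  induction L with
  | nil => simp
  | cons m L ih =>
    simp only [List.nodup_cons] at hL
    rw [List.map_cons, List.sum_cons, ih hL.2, ← count_add_countP m L hL.1 vs]
    push_cast
    ring

lemma nodup_multiples (d b : Int) (hd : 0 < d) : (PySem.List.pyRange d b d).Nodup := by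
  rw [PySem.List.pyRange_of_pos _ _ hd]
  apply List.Nodup.map _ (List.nodup_range)
  intro k1 k2 h
  have h1 : d * (k1 : Int) = d * (k2 : Int) := by linarith
  have h2 := mul_left_cancel₀ (by omega : (d : Int) ≠ 0) h1
  exact_mod_cast h2

lemma foldl_max_zero (c : Int → Int) (L : List Int) (m : Int)
    (h : ∀ d ∈ L, c d ≤ 0) (hm : 0 ≤ m) :
    L.foldl (fun m d => max m (c d)) m = m := by
  induction L generalizing m with
  | nil => rfl
  | cons d L ih =>
    rw [List.foldl_cons, max_eq_left (le_trans (h d (by simp)) hm)]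
    exact ih m (fun x hx => h x (by simp [hx])) hm

lemma cnt_zero_of_lt_two (xs : List Int) (d : Int) (h : d < 2) : pvCnt xs d = 0 := by
  unfold pvCnt
  rw [List.countP_eq_zero.mpr]
  · rfl
  · intro a _
    unfold pvPredA
    simp only [decide_eq_true_eq]
    omega

lemma cnt_eq_vals (xs : List Int) (d : Int) (h2 : 2 ≤ d) :
    pvCnt xs d = ((pvVals xs).countP (fun a => decide (PySem.Int.mod a d = 0)) : Int) := by
  unfold pvCnt pvVals
  rw [List.countP_filter]
  congr 1
  apply List.countP_congr
  intro a _
  unfold pvPredA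
  by_cases hmod : PySem.Int.mod a d = 0 <;> by_cases h2a : 2 ≤ a
  · have hd : d ∣ a := (PySem.Int.mod_eq_zero_iff_dvd a d).mp hmod
    have hda : d ≤ a := Int.le_of_dvd (by omega) hd
    simp [h2, hda, hmod, h2a]
  · simp only [hmod, h2a]
    constructor
    · rintro h'; simp at h'; omega
    · simp
  · simp [hmod, h2a]
  · simp [hmod, h2a]

lemma A_characterization (A : List Int) (n : Int) (hlen : n ≤ (A.length : Int)) :
    BiggestGCD A n =
      (PySem.List.pyRange 0 n 1).foldl (fun m d => max m (pvCnt (A.take n.toNat) d)) 0 := by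
  unfold BiggestGCD
  dsimp only
  rw [fold_range_take A n hlen (fun bs a => BiggestGCD_while bs a 2)
        ((PySem.List.pyRange 0 n 1).map (fun _ => ([] : List Int)))]
  apply PySem.List.foldl_congr_mem
  intro acc i hi
  rw [PySem.List.mem_pyRange_one] at hi
  have hb0len : ((PySem.List.pyRange 0 n 1).map (fun _ => ([] : List Int))).length = n.toNat := by
    simp [PySem.List.length_pyRange_one]
  have hblen : ((A.take n.toNat).foldl (fun bs a => BiggestGCD_while bs a 2)
      ((PySem.List.pyRange 0 n 1).map (fun _ => ([] : List Int)))).length = n.toNat := by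
    rw [foldA_length]; exact hb0len
  have hval : PySem.List.pyGetD ((A.take n.toNat).foldl (fun bs a => BiggestGCD_while bs a 2)
      ((PySem.List.pyRange 0 n 1).map (fun _ => ([] : List Int)))) i [] =
      (A.take n.toNat).filter (fun a => pvPredA i a) := by
    rw [PySem.List.pyGetD_eq_getElem _ _ hi.1 (by rw [hblen]; omega),
        ← List.getD_eq_getElem _ [] (by rw [hblen]; omega),
        foldA_getD _ _ _ (by rw [hb0len]; omega),
        getD_nil_map, List.nil_append, Int.toNat_of_nonneg hi.1]
  rw [hval]
  have hlenf : PySem.List.len ((A.take n.toNat).filter (fun a => pvPredA i a)) = pvCnt (A.take n.toNat) i := by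
    rw [PySem.List.len_eq]
    unfold pvCnt
    rw [List.countP_eq_length_filter]
  rw [hlenf]
  rcases le_or_gt (pvCnt (A.take n.toNat) i) acc with hc | hc
  · rw [if_neg (not_lt.mpr hc), max_eq_left hc]
  · rw [if_pos hc, max_eq_right hc.le]

lemma B_characterization (A : List Int) (n : Int) (hlen : n ≤ (A.length : Int)) :
    BiggestGCD_alt A n =
      (PySem.List.pyRange 2 (pvMv (A.take n.toNat) + 1) 1).foldl
        (fun m d => max m (pvCnt (A.take n.toNat) d)) 0 := by
  unfold BiggestGCD_alt
  dsimp only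
  rw [fold_range_take A n hlen
        (fun fm (a : Int) => if 2 ≤ a then
            (fm.1.insert a (fm.1.getD a 0 + 1), if fm.2 < a then a else fm.2)
          else fm)
        ((PySem.Dict.empty : PySem.Dict Int Int), (1 : Int))]
  rw [foldB_pair]
  dsimp only
  rw [runmax_eq_foldl_max]
  rw [show (A.take n.toNat).filter (fun a => decide (2 ≤ a)) = pvVals (A.take n.toNat) from rfl]
  rw [show (pvVals (A.take n.toNat)).foldl max 1 = pvMv (A.take n.toNat) from rfl]
  apply PySem.List.foldl_congr_mem
  intro acc d hd
  rw [PySem.List.mem_pyRange_one] at hd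
  have hdpos : (0 : Int) < d := by omega
  rw [PySem.List.foldl_congr_mem _ _
        (fun t mu => t + ((pvVals (A.take n.toNat)).count mu : Int)) 0
        (by intro t mu _; rw [counter_getD])]
  rw [PySem.List.foldl_add, zero_add,
      sum_count _ (nodup_multiples d (pvMv (A.take n.toNat) + 1) hdpos)]
  have hcong : (pvVals (A.take n.toNat)).countP
        (fun a => decide (a ∈ PySem.List.pyRange d (pvMv (A.take n.toNat) + 1) d))
      = (pvVals (A.take n.toNat)).countP (fun a => decide (PySem.Int.mod a d = 0)) := by
    apply List.countP_congr
    intro a ha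
    have h2a : 2 ≤ a := by
      have := (List.mem_filter.mp ha).2
      simpa using this
    have haM : a ≤ pvMv (A.take n.toNat) :=
      (PySem.List.le_foldl_max (pvVals (A.take n.toNat)) 1).2 a ha
    simp only [decide_eq_true_eq, PySem.List.mem_pyRange_iff_of_pos hdpos]
    constructor
    · rintro ⟨h1, h2, h3⟩
      have hda : d ∣ a := by
        have := dvd_add h3 (dvd_refl d)
        simpa using this
      exact (PySem.Int.mod_eq_zero_iff_dvd a d).mpr hda
    · intro hmod
      have hda : d ∣ a := (PySem.Int.mod_eq_zero_iff_dvd a d).mp hmod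
      exact ⟨Int.le_of_dvd (by omega) hda, by omega, dvd_sub hda (dvd_refl d)⟩
  rw [hcong, ← cnt_eq_vals (A.take n.toNat) d hd.1]
  rcases le_or_gt (pvCnt (A.take n.toNat) d) acc with hc | hc
  · rw [if_neg (not_lt.mpr hc), max_eq_left hc]
  · rw [if_pos hc, max_eq_right hc.le]

-- ===== VERDICT (by name: the statement is the Claim_ definition above) =====
lemma cnt_zero_of_gt_max (xs : List Int) (d : Int) (h : pvMv xs < d) : pvCnt xs d = 0 := by
  unfold pvCnt
  rw [List.countP_eq_zero.mpr]
  · rfl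
  · intro a ha hp
    unfold pvPredA at hp
    simp only [decide_eq_true_eq] at hp
    obtain ⟨h2d, hda, -⟩ := hp
    have h2a : 2 ≤ a := le_trans h2d hda
    have hav : a ∈ pvVals xs := List.mem_filter.mpr ⟨ha, by simpa using h2a⟩
    have := (PySem.List.le_foldl_max (pvVals xs) 1).2 a hav
    unfold pvMv at h
    omega

theorem BiggestGCD_spec : Claim_equal_BiggestGCD := by
  intro A n hDom hPre
  obtain ⟨hlen, helem⟩ := hPre
  unfold Spec_BiggestGCD
  rw [A_characterization A n hlen, B_characterization A n hlen]
  by_cases hv : pvVals (A.take n.toNat) = []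
  · have hc : ∀ d : Int, pvCnt (A.take n.toNat) d = 0 := by
      intro d
      unfold pvCnt
      rw [List.countP_eq_zero.mpr]
      · rfl
      · intro a ha hp
        unfold pvPredA at hp
        simp only [decide_eq_true_eq] at hp
        have h2a : 2 ≤ a := le_trans hp.1 hp.2.1
        have : a ∈ pvVals (A.take n.toNat) := List.mem_filter.mpr ⟨ha, by simpa using h2a⟩
        rw [hv] at this
        exact absurd this (List.not_mem_nil)
    have hMv : pvMv (A.take n.toNat) = 1 := by simp only [pvMv, hv]; rfl
    rw [hMv, show PySem.List.pyRange 2 (1 + 1) 1 = [] from PySem.List.pyRange_one_eq_nil (by omega),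
        List.foldl_nil, foldl_max_zero _ _ _ (fun d _ => le_of_eq (hc d)) le_rfl]
  · have hmem : pvMv (A.take n.toNat) ∈ pvVals (A.take n.toNat) := by
      rcases PySem.List.foldl_max_mem (pvVals (A.take n.toNat)) 1 with h | h
      · exfalso
        obtain ⟨a, ha⟩ := List.exists_mem_of_ne_nil _ hv
        have h2a : 2 ≤ a := by
          have := (List.mem_filter.mp ha).2
          simpa using this
        have hle := (PySem.List.le_foldl_max (pvVals (A.take n.toNat)) 1).2 a ha
        omega
      · exact h
    have h2M : 2 ≤ pvMv (A.take n.toNat) := by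
      have := (List.mem_filter.mp hmem).2
      simpa using this
    have hMn : pvMv (A.take n.toNat) < n := by
      have hx : pvMv (A.take n.toNat) ∈ A.take n.toNat := (List.mem_filter.mp hmem).1
      rcases helem _ hx with h | h
      · omega
      · exact h
    rw [PySem.List.pyRange_one_append 0 2 n (by omega) (by omega),
        PySem.List.pyRange_one_append 2 (pvMv (A.take n.toNat) + 1) n (by omega) (by omega),
        List.foldl_append, List.foldl_append,
        show PySem.List.pyRange 0 2 1 = [0, 1] by
          rw [PySem.List.pyRange_one_cons (by omega), PySem.List.pyRange_one_cons (by omega),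
              PySem.List.pyRange_one_eq_nil (by omega)]
          norm_num]
    simp only [List.foldl_cons, List.foldl_nil,
        cnt_zero_of_lt_two (A.take n.toNat) 0 (by omega),
        cnt_zero_of_lt_two (A.take n.toNat) 1 (by omega), max_self]
    apply foldl_max_zero
    · intro d hd
      rw [PySem.List.mem_pyRange_one] at hd
      exact le_of_eq (cnt_zero_of_gt_max (A.take n.toNat) d (by omega))
    · exact (PySem.List.le_foldl_max_int _ _ 0).1
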